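-- pv_equiv track=rewrite | github.com/savio-henrique/ED-2022 | Sem4/sabacchard_teste.py | sabacchard
-- ===== SOURCE A (Python) =====
-- def sabacchard(cartas, estado=False, retorno=0):
--     if len(cartas) <= 1:
--         return cartas[0]
--     val_esq = cartas[0]
--     val_dir = cartas[-1]
--
--     maior_esq = sabacchard(cartas[1:], not estado, val_esq)
--     maior_dir = sabacchard(cartas[0:-1], not estado, val_dir)
--
--     if maior_esq >= maior_dir:
--         maior = maior_esq
--     else:
--         maior = maior_dir
--
--     if estado:
--         retorno += maior
--         return retorno
--     elif not estado:
--         return maior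
-- ===== SOURCE B (Python) =====
-- def sabacchard(cartas, estado=False, retorno=0):
--     memo = {}
--
--     def solve(i, j, e, r):
--         if j - i <= 1:
--             return cartas[i]
--         if (i, j) not in memo:
--             esq = solve(i + 1, j, not e, cartas[i])
--             dir = solve(i, j - 1, not e, cartas[j - 1])
--             memo[(i, j)] = max(esq, dir)
--         m = memo[(i, j)]
--         return m + r if e else m
--
--     return solve(0, len(cartas), estado, retorno)
-- ===== Notes on version B (the rewrite author's own statement) =====
-- stated objective: faster
-- what changed: A's exponential double recursion is replaced by a top-down recursion over index pairs (i, j) whose per-subarray max is cached in a dictionary, giving O(n^2) subproblems; Pre_ excludes only the empty list, on which A raises IndexError.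
-- outside the precondition, e.g. on sabacchard([], False, 0): A raises IndexError, B raises IndexError
import Mathlib
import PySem

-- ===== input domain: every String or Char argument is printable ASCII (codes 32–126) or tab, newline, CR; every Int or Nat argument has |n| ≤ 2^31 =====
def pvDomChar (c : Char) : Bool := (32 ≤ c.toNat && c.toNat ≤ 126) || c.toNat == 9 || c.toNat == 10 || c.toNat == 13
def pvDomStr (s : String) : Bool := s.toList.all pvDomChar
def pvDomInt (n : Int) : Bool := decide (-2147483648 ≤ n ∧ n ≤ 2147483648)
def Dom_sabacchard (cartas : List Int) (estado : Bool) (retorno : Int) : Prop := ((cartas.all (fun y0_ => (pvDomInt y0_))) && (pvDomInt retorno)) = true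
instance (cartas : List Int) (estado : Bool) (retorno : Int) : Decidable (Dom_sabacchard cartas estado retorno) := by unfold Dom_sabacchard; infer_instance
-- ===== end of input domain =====

-- B replaces A's exponential double recursion with the same recursion over index
-- pairs (i, j) memoized in a dictionary (the max over each subarray is independent
-- of the inherited boundary value, so it is cached once per subarray).

-- ===== PORT A =====
def sabacchard (cartas : List Int) (estado : Bool) (retorno : Int) : Int :=
  if cartas.length ≤ 1 then
    (PySem.List.pyGet? cartas 0).getD 0
  else
    let val_esq := (PySem.List.pyGet? cartas 0).getD 0
    let val_dir := (PySem.List.pyGet? cartas (-1)).getD 0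
    let maior_esq := sabacchard (PySem.List.slice cartas (some 1) none) (!estado) val_esq
    let maior_dir := sabacchard (PySem.List.slice cartas (some 0) (some (-1))) (!estado) val_dir
    let maior := if maior_esq ≥ maior_dir then maior_esq else maior_dir
    if estado then retorno + maior else maior
termination_by cartas.length
decreasing_by
  · simp [PySem.List.slice]; omega
  · simp [PySem.List.slice]; omega

-- ===== PORT B =====
-- the inner 'solve' of Source B: the memo dict is threaded through as state
def sabSolve (cartas : List Int) (memo : PySem.Dict (Int × Int) Int) (i j : Int) (e : Bool) (r : Int) :
    Int × PySem.Dict (Int × Int) Int :=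
  if j - i ≤ 1 then
    ((PySem.List.pyGet? cartas i).getD 0, memo)
  else
    let memo1 :=
      if memo.contains (i, j) then memo
      else
        let p1 := sabSolve cartas memo (i + 1) j (!e) ((PySem.List.pyGet? cartas i).getD 0)
        let p2 := sabSolve cartas p1.2 i (j - 1) (!e) ((PySem.List.pyGet? cartas (j - 1)).getD 0)
        p2.2.insert (i, j) (max p1.1 p2.1)
    let m := (memo1.get? (i, j)).getD 0
    (if e then m + r else m, memo1)
termination_by (j - i).toNat
decreasing_by
  · omega
  · omega

def sabacchard_alt (cartas : List Int) (estado : Bool) (retorno : Int) : Int :=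
  (sabSolve cartas PySem.Dict.empty 0 cartas.length estado retorno).1

-- ===== PRECONDITION & SPEC =====
-- Pre_ excludes only the empty list, on which the Python A raises IndexError (cartas[0]); B raises there too.
def Pre_sabacchard (cartas : List Int) (estado : Bool) (retorno : Int) : Prop := cartas ≠ []
instance (cartas : List Int) (estado : Bool) (retorno : Int) : Decidable (Pre_sabacchard cartas estado retorno) := by unfold Pre_sabacchard; infer_instance
def pvWitness_sabacchard : List Int × Bool × Int := ([3, -1, 4, 1], true, 5)

def Spec_sabacchard (cartas : List Int) (estado : Bool) (retorno : Int) (out : Int) : Prop := out = sabacchard_alt cartas estado retorno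
instance (cartas : List Int) (estado : Bool) (retorno : Int) (out : Int) : Decidable (Spec_sabacchard cartas estado retorno out) := by unfold Spec_sabacchard; infer_instance

-- ===== CLAIM (what is proved, stated in full; the proofs are below) =====
def Claim_equal_sabacchard : Prop := ∀ (cartas : List Int) (estado : Bool) (retorno : Int), Dom_sabacchard cartas estado retorno → Pre_sabacchard cartas estado retorno → Spec_sabacchard cartas estado retorno (sabacchard cartas estado retorno)

-- ===== LEMMAS AND PROOFS =====
-- the common mathematical value: max, over all orders of removing boundary cards,
-- of the final card plus the boundary cards collected at the 'estado' levels
def Wfun : List Int → Bool → Int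
  | xs, e =>
    if xs.length ≤ 1 then xs.headD 0
    else
      max (Wfun xs.tail (!e) + (if (!e) = true ∧ 3 ≤ xs.length then xs.headD 0 else 0))
          (Wfun xs.dropLast (!e) + (if (!e) = true ∧ 3 ≤ xs.length then xs.getLast?.getD 0 else 0))
termination_by xs => xs.length
decreasing_by
  · simp; omega
  · simp; omega

theorem slice1 (xs : List Int) : PySem.List.slice xs (some 1) none = xs.tail := by
  have := PySem.List.slice_from_natCast xs (a := 1); simpa using this

theorem slice01 (xs : List Int) : PySem.List.slice xs (some 0) (some (-1)) = xs.dropLast := by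
  rw [PySem.List.slice_zero_start]
  have := PySem.List.slice_to_neg_natCast (xs := xs) (k := 1) (by omega)
  simpa [List.dropLast_eq_take] using this

theorem get0 (xs : List Int) : (PySem.List.pyGet? xs 0).getD 0 = xs.headD 0 := by
  simp [PySem.List.pyGet?_zero, List.head?_eq_getElem?]

theorem getm1 (xs : List Int) : (PySem.List.pyGet? xs (-1)).getD 0 = xs.getLast?.getD 0 := by
  simp [PySem.List.pyGet?_neg_one]

theorem W_le_one (ys : List Int) (e : Bool) (h : ys.length ≤ 1) : Wfun ys e = ys.headD 0 := by
  rw [Wfun]; simp [h]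

theorem sab_eq_W : ∀ (n : ℕ) (xs : List Int), xs.length = n → ∀ (e : Bool) (r : Int),
    sabacchard xs e r = Wfun xs e + (if e = true ∧ 2 ≤ xs.length then r else 0) := by
  intro n
  induction n using Nat.strong_induction_on with
  | _ n ih =>
    intro xs hlen e r
    rw [sabacchard, Wfun]
    by_cases h1 : xs.length ≤ 1
    · simp [h1, get0]
    · rw [if_neg h1, if_neg h1]
      rw [slice1, slice01, get0, getm1]
      dsimp only
      have hlt : xs.tail.length < n := by simp; omega
      have hld : xs.dropLast.length < n := by simp; omega
      rw [ih _ hlt xs.tail rfl (!e) (xs.headD 0),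
          ih _ hld xs.dropLast rfl (!e) (xs.getLast?.getD 0)]
      have htl : xs.tail.length = xs.length - 1 := by simp
      have hdl : xs.dropLast.length = xs.length - 1 := by simp
      have hc : (2 ≤ xs.tail.length ↔ 3 ≤ xs.length) := by omega
      have hc2 : (2 ≤ xs.dropLast.length ↔ 3 ≤ xs.length) := by omega
      simp only [hc, hc2]
      rcases e with _ | _
      · simp [max_def]
        split_ifs <;> omega
      · simp [max_def]
        split_ifs <;> omega

-- the estado seen by every call on a length-L subarray (fixed by parity of depth)
def eAt (e0 : Bool) (n L : ℕ) : Bool := if (n - L) % 2 = 0 then e0 else !e0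

-- the memo invariant: every stored entry (i, j) ↦ v is the Wfun value of cartas[i:j]
def MemoInv (xs : List Int) (e0 : Bool) (memo : PySem.Dict (Int × Int) Int) : Prop :=
  ∀ p v, memo.get? p = some v → ∃ a L : ℕ, p.1 = (a : Int) ∧ p.2 = ((a + L : ℕ) : Int) ∧
    2 ≤ L ∧ a + L ≤ xs.length ∧ v = Wfun ((xs.drop a).take L) (eAt e0 xs.length L)

theorem memoInv_empty (xs : List Int) (e0 : Bool) : MemoInv xs e0 PySem.Dict.empty := by
  intro p v h; simp [PySem.Dict.get?_empty] at h

theorem eAt_flip (e0 : Bool) (n L : ℕ) (h1 : 1 ≤ L) (h2 : L ≤ n) :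
    (!eAt e0 n L) = eAt e0 n (L - 1) := by
  unfold eAt
  have h3 : (n - (L - 1)) = (n - L) + 1 := by omega
  rw [h3]
  by_cases hp : (n - L) % 2 = 0
  · have : ¬ ((n - L + 1) % 2 = 0) := by omega
    simp [hp, this]
  · have : (n - L + 1) % 2 = 0 := by omega
    simp [hp, this]

theorem getA (xs : List Int) (a : ℕ) (h : a < xs.length) :
    (PySem.List.pyGet? xs (a : Int)).getD 0 = xs.getD a 0 := by
  simp [PySem.List.pyGet?_natCast, List.getD]

theorem solve_spec (xs : List Int) (e0 : Bool) :
    ∀ (L : ℕ), ∀ (a : ℕ), 1 ≤ L → a + L ≤ xs.length →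
    ∀ (memo : PySem.Dict (Int × Int) Int) (r : Int), MemoInv xs e0 memo →
    (sabSolve xs memo (a : Int) ((a + L : ℕ) : Int) (eAt e0 xs.length L) r).1
        = Wfun ((xs.drop a).take L) (eAt e0 xs.length L)
          + (if (eAt e0 xs.length L) = true ∧ 2 ≤ L then r else 0)
      ∧ MemoInv xs e0 (sabSolve xs memo (a : Int) ((a + L : ℕ) : Int) (eAt e0 xs.length L) r).2 := by
  intro L
  induction L using Nat.strong_induction_on with
  | _ L ih =>
    intro a hL hle memo r hinv
    rw [sabSolve]
    by_cases h1 : ((a + L : ℕ) : Int) - (a : Int) ≤ 1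
    · -- base case: L = 1
      have hL1 : L = 1 := by omega
      have ha : a < xs.length := by omega
      rw [if_pos h1]
      refine ⟨?_, hinv⟩
      rw [getA xs a ha, W_le_one _ _ (by simp; omega)]
      have hhead : ((xs.drop a).take L).headD 0 = xs.getD a 0 := by
        rw [List.headD_eq_head?, List.head?_take, List.head?_drop]
        simp [show L ≠ 0 by omega, List.getD, List.getElem?_eq_getElem ha]
      rw [hhead]
      simp [hL1]
    · rw [if_neg h1]
      have hL2 : 2 ≤ L := by omega
      set n := xs.length with hn
      set e := eAt e0 n L with he
      -- value that any correct memo entry at (a, a+L) must hold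
      have hW : Wfun ((xs.drop a).take L) e =
          max (Wfun ((xs.drop (a+1)).take (L-1)) (!e) + (if (!e) = true ∧ 2 ≤ L - 1 then xs.getD a 0 else 0))
              (Wfun ((xs.drop a).take (L-1)) (!e) + (if (!e) = true ∧ 2 ≤ L - 1 then xs.getD (a + (L - 1)) 0 else 0)) := by
        have hseglen : ((xs.drop a).take L).length = L := by simp; omega
        have htail : ((xs.drop a).take L).tail = (xs.drop (a+1)).take (L-1) := by
          rw [← List.drop_one, List.drop_take, List.drop_drop]
        have hdropLast : ((xs.drop a).take L).dropLast = (xs.drop a).take (L-1) := by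
          rw [List.dropLast_eq_take, hseglen, List.take_take]
          congr 1; omega
        have ha : a < xs.length := by omega
        have hhead : ((xs.drop a).take L).headD 0 = xs.getD a 0 := by
          rw [List.headD_eq_head?, List.head?_take, List.head?_drop]
          simp [show L ≠ 0 by omega, List.getD, List.getElem?_eq_getElem ha]
        have hlast : ((xs.drop a).take L).getLast?.getD 0 = xs.getD (a + (L - 1)) 0 := by
          rw [List.getLast?_eq_getElem?, hseglen]
          rw [List.getElem?_take_of_lt (by omega : L - 1 < L), List.getElem?_drop]
          have hl2 : a + (L-1) < xs.length := by omega
          simp [List.getElem?_eq_getElem hl2, List.getD]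
        rw [Wfun]
        rw [if_neg (by omega : ¬ ((xs.drop a).take L).length ≤ 1)]
        rw [htail, hdropLast, hseglen, hhead, hlast]
        have h32 : ((!e) = true ∧ 3 ≤ L) ↔ ((!e) = true ∧ 2 ≤ L - 1) := by
          constructor <;> (rintro ⟨x, y⟩; exact ⟨x, by omega⟩)
        simp only [h32]
      -- the child state is (!e), the child eAt of length L-1
      have hflip : (!e) = eAt e0 n (L - 1) := eAt_flip e0 n L (by omega) (by omega)
      by_cases hc : memo.contains ((a : Int), ((a + L : ℕ) : Int))
      · -- memo hit
        rw [if_pos hc]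
        dsimp only
        obtain ⟨v, hv⟩ : ∃ v, memo.get? ((a : Int), ((a + L : ℕ) : Int)) = some v := by
          have := PySem.Dict.contains_eq_isSome_get? (d := memo) (k := ((a : Int), ((a + L : ℕ) : Int)))
          rw [hc] at this
          cases hg : memo.get? ((a : Int), ((a + L : ℕ) : Int)) with
          | none => rw [hg] at this; simp at this
          | some v => exact ⟨v, rfl⟩
        obtain ⟨a', L', hp1, hp2, hL2', hle', hv'⟩ := hinv _ _ hv
        have haa : a' = a := by
          have h' := hp1; simp at h'; exact_mod_cast h'.symm
        have hLL : L' = L := by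
          have h' := hp2; simp at h'
          have h'' : a + L = a' + L' := by exact_mod_cast h'
          omega
        rw [haa, hLL] at hv'
        have hv'' : v = Wfun ((xs.drop a).take L) e := hv'
        refine ⟨?_, hinv⟩
        rw [hv, Option.getD_some, hv'']
        by_cases hE : e = true
        · simp [hE, hL2]
        · simp [hE]
      · -- memo miss: two recursive calls, then insert
        rw [if_neg hc]
        dsimp only
        have ha : a < xs.length := by omega
        have hlast_lt : a + (L - 1) < xs.length := by omega
        have hcast1i : (a : Int) + 1 = ((a + 1 : ℕ) : Int) := by push_cast; ring
        have hcast1j : ((a + L : ℕ) : Int) = (((a + 1) + (L - 1) : ℕ) : Int) := by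
          congr 1; omega
        have hcast2 : ((a + L : ℕ) : Int) - 1 = ((a + (L - 1) : ℕ) : Int) := by push_cast; omega
        have ih1 := ih (L - 1) (by omega) (a + 1) (by omega) (by omega) memo (xs.getD a 0) hinv
        rw [← hflip] at ih1
        rw [← hcast1j] at ih1
        rw [getA xs a ha, hcast1i]
        obtain ⟨ih1v, ih1inv⟩ := ih1
        set p1 := sabSolve xs memo (((a + 1) : ℕ) : Int) ((a + L : ℕ) : Int) (!e) (xs.getD a 0) with hp1def
        have ih2 := ih (L - 1) (by omega) a (by omega) (by omega) p1.2 (xs.getD (a + (L - 1)) 0) ih1inv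
        rw [← hflip] at ih2
        obtain ⟨ih2v, ih2inv⟩ := ih2
        rw [hcast2, getA xs (a + (L - 1)) hlast_lt]
        set p2 := sabSolve xs p1.2 ((a : ℕ) : Int) ((a + (L - 1) : ℕ) : Int) (!e) (xs.getD (a + (L - 1)) 0) with hp2def
        -- the stored value equals Wfun of the segment
        have hstore : max p1.1 p2.1 = Wfun ((xs.drop a).take L) e := by
          rw [hW, ih1v, ih2v]
        have hinv' : MemoInv xs e0 (p2.2.insert ((a : Int), ((a + L : ℕ) : Int)) (max p1.1 p2.1)) := by
          intro p v hv
          rw [PySem.Dict.get?_insert] at hv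
          by_cases hpe : p = ((a : Int), ((a + L : ℕ) : Int))
          · rw [if_pos hpe] at hv
            refine ⟨a, L, ?_, ?_, hL2, hle, ?_⟩
            · rw [hpe]
            · rw [hpe]
            · have hveq : v = max p1.1 p2.1 := by injection hv with hh; exact hh.symm
              rw [hveq, hstore, he]
          · rw [if_neg hpe] at hv
            exact ih2inv _ _ hv
        refine ⟨?_, hinv'⟩
        rw [PySem.Dict.get?_insert_self, Option.getD_some, hstore]
        by_cases hE : e = true
        · simp [hE, hL2]
        · simp [hE]

theorem final_check (xs : List Int) (e : Bool) (r : Int) (hpre : xs ≠ []) :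
    sabacchard xs e r = sabacchard_alt xs e r := by
  have hn1 : 1 ≤ xs.length := List.length_pos_iff.mpr hpre
  have he0 : eAt e xs.length xs.length = e := by
    unfold eAt; simp
  have h := solve_spec xs e xs.length 0 hn1 (by omega) PySem.Dict.empty r (memoInv_empty xs e)
  unfold sabacchard_alt
  have hcast : ((0 + xs.length : ℕ) : Int) = (xs.length : Int) := by push_cast; ring
  rw [← hcast]
  rw [he0] at h
  have hz : ((0 : ℕ) : Int) = (0 : Int) := rfl
  rw [← hz]
  rw [h.1]
  simp only [List.drop_zero, List.take_length]
  rw [sab_eq_W xs.length xs rfl e r]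

-- ===== VERDICT (by name: the statement is the Claim_ definition above) =====
theorem sabacchard_spec : Claim_equal_sabacchard := by
  intro cartas estado retorno _ hpre
  unfold Spec_sabacchard
  exact final_check cartas estado retorno hpre
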